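-- pv_equiv track=rewrite | github.com/VarshiniGunti/openenv-bug-triage-env | core/env.py | _generate_module_descriptions
-- ===== SOURCE A (Python) =====
-- def _generate_module_descriptions(modules: list) -> dict:
--     """
--     Generate simple descriptions for modules to help agent reasoning.
--
--     Args:
--         modules: List of module names
--
--     Returns:
--         Dictionary mapping module names to descriptions
--     """
--     descriptions = {}
--     for module in modules:
--         # Extract module name without extension
--         module_name = module.replace(".py", "").lower()
--
--         # Generate simple, non-leaking descriptions based on module name
--         if "auth" in module_name:
--             descriptions[module] = "Handles authentication and user session management"
--         elif "user" in module_name: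
--             descriptions[module] = "Manages user profile data and user-related operations"
--         elif "database" in module_name or "db" in module_name:
--             descriptions[module] = "Provides database connection and query utilities"
--         elif "cache" in module_name:
--             descriptions[module] = "Implements caching layer for performance optimization"
--         elif "api" in module_name or "server" in module_name:
--             descriptions[module] = "Handles API endpoints and server request processing"
--         elif "model" in module_name:
--             descriptions[module] = "Defines data models and business logic"
--         elif "util" in module_name or "helper" in module_name:
--             descriptions[module] = "Provides utility functions and helper methods"
--         elif "config" in module_name:
--             descriptions[module] = "Manages application configuration and settings"
--         elif "logger" in module_name or "log" in module_name:
--             descriptions[module] = "Handles logging and debugging functionality"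
--         else:
--             # Generic description for unknown modules
--             descriptions[module] = f"Module for {module_name} functionality"
--
--     return descriptions
-- ===== SOURCE B (Python) =====
-- _KEYWORD_DESCRIPTIONS = [
--     ("auth", "Handles authentication and user session management"),
--     ("user", "Manages user profile data and user-related operations"),
--     ("database", "Provides database connection and query utilities"),
--     ("db", "Provides database connection and query utilities"),
--     ("cache", "Implements caching layer for performance optimization"),
--     ("api", "Handles API endpoints and server request processing"),
--     ("server", "Handles API endpoints and server request processing"),
--     ("model", "Defines data models and business logic"),
--     ("util", "Provides utility functions and helper methods"),
--     ("helper", "Provides utility functions and helper methods"),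
--     ("config", "Manages application configuration and settings"),
--     ("logger", "Handles logging and debugging functionality"),
--     ("log", "Handles logging and debugging functionality"),
-- ]
--
--
-- def _norm(module):
--     return module.replace(".py", "").lower()
--
--
-- def _generate_module_descriptions(modules: list) -> dict:
--     # Start every module on the generic description, then sweep the keyword
--     # table from lowest to highest priority, overwriting matches; the last
--     # overwrite (highest priority keyword) wins.
--     descriptions = {m: f"Module for {_norm(m)} functionality" for m in modules}
--     for keyword, description in reversed(_KEYWORD_DESCRIPTIONS):
--         for m in modules:
--             if keyword in _norm(m):
--                 descriptions[m] = description
--     return descriptions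
-- ===== Notes on version B (the rewrite author's own statement) =====
-- stated objective: alternative
-- what changed: Instead of scanning A's if/elif keyword chain once per module, B initialises every module to the generic description and then sweeps a flat (keyword, description) table in reverse priority order, overwriting matching modules so that the last overwrite (highest-priority keyword) wins.
import Mathlib
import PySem

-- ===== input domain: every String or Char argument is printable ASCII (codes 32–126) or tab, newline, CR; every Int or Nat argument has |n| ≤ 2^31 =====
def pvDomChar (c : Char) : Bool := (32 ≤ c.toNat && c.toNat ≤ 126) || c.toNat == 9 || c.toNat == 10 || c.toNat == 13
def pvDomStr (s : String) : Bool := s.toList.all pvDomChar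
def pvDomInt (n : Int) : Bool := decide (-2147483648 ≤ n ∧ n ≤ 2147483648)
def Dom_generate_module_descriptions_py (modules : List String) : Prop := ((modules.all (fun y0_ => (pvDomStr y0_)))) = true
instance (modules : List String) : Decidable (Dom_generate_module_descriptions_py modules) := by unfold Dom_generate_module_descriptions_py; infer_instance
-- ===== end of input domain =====

-- B replaces A's per-module first-match if/elif chain by staged overwrite passes: every module starts on the generic description, then each keyword of a flat table is swept in reverse priority order, overwriting matching modules (alternative decomposition; same cost class).


-- ===== PORT A =====
def generate_module_descriptions_py (modules : List String) : List (String × String) :=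
  (modules.foldl (fun (descriptions : PySem.Dict String String) module =>
    let module_name := PySem.Str.lower (PySem.Str.replace module ".py" "")
    if PySem.Str.isIn "auth" module_name then
      descriptions.insert module "Handles authentication and user session management"
    else if PySem.Str.isIn "user" module_name then
      descriptions.insert module "Manages user profile data and user-related operations"
    else if PySem.Str.isIn "database" module_name || PySem.Str.isIn "db" module_name then
      descriptions.insert module "Provides database connection and query utilities"
    else if PySem.Str.isIn "cache" module_name then
      descriptions.insert module "Implements caching layer for performance optimization"
    else if PySem.Str.isIn "api" module_name || PySem.Str.isIn "server" module_name then
      descriptions.insert module "Handles API endpoints and server request processing"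
    else if PySem.Str.isIn "model" module_name then
      descriptions.insert module "Defines data models and business logic"
    else if PySem.Str.isIn "util" module_name || PySem.Str.isIn "helper" module_name then
      descriptions.insert module "Provides utility functions and helper methods"
    else if PySem.Str.isIn "config" module_name then
      descriptions.insert module "Manages application configuration and settings"
    else if PySem.Str.isIn "logger" module_name || PySem.Str.isIn "log" module_name then
      descriptions.insert module "Handles logging and debugging functionality"
    else
      descriptions.insert module ("Module for " ++ module_name ++ " functionality"))
    PySem.Dict.empty).items

-- ===== PORT B =====
-- Source B's flat priority table (keyword, description), in forward priority order
def pvKeywordDescriptions : List (String × String) :=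
  [ ("auth", "Handles authentication and user session management")
  , ("user", "Manages user profile data and user-related operations")
  , ("database", "Provides database connection and query utilities")
  , ("db", "Provides database connection and query utilities")
  , ("cache", "Implements caching layer for performance optimization")
  , ("api", "Handles API endpoints and server request processing")
  , ("server", "Handles API endpoints and server request processing")
  , ("model", "Defines data models and business logic")
  , ("util", "Provides utility functions and helper methods")
  , ("helper", "Provides utility functions and helper methods")
  , ("config", "Manages application configuration and settings")
  , ("logger", "Handles logging and debugging functionality")
  , ("log", "Handles logging and debugging functionality") ]

-- Source B's _norm
def pvNorm (module : String) : String := PySem.Str.lower (PySem.Str.replace module ".py" "")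

def generate_module_descriptions_py_alt (modules : List String) : List (String × String) :=
  -- descriptions = {m: generic for m in modules}
  let descriptions := modules.foldl
    (fun (d : PySem.Dict String String) m =>
      d.insert m ("Module for " ++ pvNorm m ++ " functionality")) PySem.Dict.empty
  -- for keyword, description in reversed(table): for m in modules: overwrite on match
  (pvKeywordDescriptions.reverse.foldl
    (fun d kd =>
      modules.foldl (fun d m => if PySem.Str.isIn kd.1 (pvNorm m) then d.insert m kd.2 else d) d)
    descriptions).items

-- ===== PRECONDITION & SPEC =====
def Spec_generate_module_descriptions_py (modules : List String) (out : List (String × String)) : Prop := out = generate_module_descriptions_py_alt modules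
instance (modules : List String) (out : List (String × String)) : Decidable (Spec_generate_module_descriptions_py modules out) := by unfold Spec_generate_module_descriptions_py; infer_instance

-- ===== CLAIM (what is proved, stated in full; the proofs are below) =====
def Claim_equal_generate_module_descriptions_py : Prop := ∀ (modules : List String), Dom_generate_module_descriptions_py modules → Spec_generate_module_descriptions_py modules (generate_module_descriptions_py modules)

-- ===== LEMMAS AND PROOFS =====

-- A's if/elif chain as a function of the normalised name (proof-only)
def pvChain (n : String) : String :=
  if PySem.Str.isIn "auth" n then "Handles authentication and user session management"
  else if PySem.Str.isIn "user" n then "Manages user profile data and user-related operations"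
  else if PySem.Str.isIn "database" n || PySem.Str.isIn "db" n then "Provides database connection and query utilities"
  else if PySem.Str.isIn "cache" n then "Implements caching layer for performance optimization"
  else if PySem.Str.isIn "api" n || PySem.Str.isIn "server" n then "Handles API endpoints and server request processing"
  else if PySem.Str.isIn "model" n then "Defines data models and business logic"
  else if PySem.Str.isIn "util" n || PySem.Str.isIn "helper" n then "Provides utility functions and helper methods"
  else if PySem.Str.isIn "config" n then "Manages application configuration and settings"
  else if PySem.Str.isIn "logger" n || PySem.Str.isIn "log" n then "Handles logging and debugging functionality"
  else "Module for " ++ n ++ " functionality"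

-- first-match value of a keyword table on a name (proof-only characterisation)
def pvTableVal : List (String × String) → String → Option String
  | [], _ => none
  | kd :: kds, n => if PySem.Str.isIn kd.1 n then some kd.2 else pvTableVal kds n

lemma pvTableVal_append (l1 l2 : List (String × String)) (n : String) :
    pvTableVal (l1 ++ l2) n = (pvTableVal l1 n).or (pvTableVal l2 n) := by
  induction l1 with
  | nil => simp [pvTableVal]
  | cons kd l1 ih =>
    simp only [List.cons_append, pvTableVal, ih]
    split_ifs <;> simp

-- a build loop 'insert m (v m)' looks up to v on members
lemma pv_build_get (v : String → String) (l : List String) (d : PySem.Dict String String) (x : String) :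
    (l.foldl (fun d m => d.insert m (v m)) d).get? x = if x ∈ l then some (v x) else d.get? x := by
  induction l generalizing d with
  | nil => simp
  | cons a l ih =>
    simp only [List.foldl_cons, ih, PySem.Dict.get?_insert, List.mem_cons]
    by_cases hx : x ∈ l <;> by_cases hxa : x = a <;> simp_all

-- one overwrite pass with a constant value
lemma pv_pass_get (p : String → Bool) (c : String) (l : List String) (d : PySem.Dict String String) (x : String) :
    (l.foldl (fun d m => if p m then d.insert m c else d) d).get? x
      = if x ∈ l ∧ p x = true then some c else d.get? x := by
  induction l generalizing d with
  | nil => simp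
  | cons a l ih =>
    simp only [List.foldl_cons, ih, List.mem_cons]
    by_cases hpa : p a = true <;> by_cases hxa : x = a <;>
      by_cases hx : x ∈ l <;> simp_all [PySem.Dict.get?_insert]

-- a pass over existing keys leaves the key list unchanged
lemma pv_pass_keys (p : String → Bool) (c : String) (l : List String) (d : PySem.Dict String String)
    (h : ∀ m ∈ l, m ∈ d.keys) :
    (l.foldl (fun d m => if p m then d.insert m c else d) d).keys = d.keys := by
  induction l generalizing d with
  | nil => simp
  | cons a l ih =>
    simp only [List.foldl_cons]
    by_cases hpa : p a = true
    · have hc : d.contains a = true := by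
        rw [PySem.Dict.contains_iff_mem_keys]; exact h a (List.mem_cons_self ..)
      have hk : (d.insert a c).keys = d.keys := PySem.Dict.keys_insert_of_contains d c hc
      rw [if_pos hpa, ih (d.insert a c) (fun m hm => by rw [hk]; exact h m (List.mem_cons_of_mem _ hm)), hk]
    · rw [if_neg hpa, ih d (fun m hm => h m (List.mem_cons_of_mem _ hm))]

-- the whole sweep: the last matching pass (first keyword of the un-reversed list) wins
lemma pv_sweep_get (kds : List (String × String)) (modules : List String)
    (d : PySem.Dict String String) (x : String) :
    (kds.foldl (fun d kd =>
        modules.foldl (fun d m => if PySem.Str.isIn kd.1 (pvNorm m) then d.insert m kd.2 else d) d)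
      d).get? x
    = if x ∈ modules then (pvTableVal kds.reverse (pvNorm x)).elim (d.get? x) some
      else d.get? x := by
  induction kds generalizing d with
  | nil => simp [pvTableVal]
  | cons kd kds ih =>
    rw [List.foldl_cons, ih, List.reverse_cons, pvTableVal_append]
    rcases hf : pvTableVal kds.reverse (pvNorm x) with _ | s
    · rw [pv_pass_get (fun m => PySem.Str.isIn kd.1 (pvNorm m)) kd.2 modules d x]
      by_cases hx : x ∈ modules
      · simp only [hx, true_and, if_true, pvTableVal]
        split_ifs <;> simp
      · simp [hx]
    · by_cases hx : x ∈ modules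
      · simp [hx]
      · rw [pv_pass_get (fun m => PySem.Str.isIn kd.1 (pvNorm m)) kd.2 modules d x]
        simp [hx]

lemma pv_sweep_keys (kds : List (String × String)) (modules : List String)
    (d : PySem.Dict String String) (h : ∀ m ∈ modules, m ∈ d.keys) :
    (kds.foldl (fun d kd =>
        modules.foldl (fun d m => if PySem.Str.isIn kd.1 (pvNorm m) then d.insert m kd.2 else d) d)
      d).keys = d.keys := by
  induction kds generalizing d with
  | nil => rfl
  | cons kd kds ih =>
    simp only [List.foldl_cons]
    have hk := pv_pass_keys (fun m => PySem.Str.isIn kd.1 (pvNorm m)) kd.2 modules d h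
    rw [ih _ (fun m hm => by rw [hk]; exact h m hm), hk]

-- first match in the flat table, with the generic default, = A's grouped if/elif chain
set_option maxHeartbeats 1000000 in
lemma pv_table_eq_chain (n : String) :
    (pvTableVal pvKeywordDescriptions n).getD ("Module for " ++ n ++ " functionality") = pvChain n := by
  simp only [pvKeywordDescriptions, pvTableVal, pvChain]
  generalize PySem.Str.isIn "auth" n = b1
  generalize PySem.Str.isIn "user" n = b2
  generalize PySem.Str.isIn "database" n = b3
  generalize PySem.Str.isIn "db" n = b4
  generalize PySem.Str.isIn "cache" n = b5
  generalize PySem.Str.isIn "api" n = b6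
  generalize PySem.Str.isIn "server" n = b7
  generalize PySem.Str.isIn "model" n = b8
  generalize PySem.Str.isIn "util" n = b9
  generalize PySem.Str.isIn "helper" n = b10
  generalize PySem.Str.isIn "config" n = b11
  generalize PySem.Str.isIn "logger" n = b12
  generalize PySem.Str.isIn "log" n = b13
  cases b1 <;> cases b2 <;> cases b3 <;> cases b4 <;> cases b5 <;> cases b6 <;> cases b7 <;> cases b8 <;> cases b9 <;> cases b10 <;> cases b11 <;> cases b12 <;> cases b13 <;> rfl

-- A's loop body written as an insert of pvChain
lemma pv_bodyA : (fun (descriptions : PySem.Dict String String) module =>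
    let module_name := PySem.Str.lower (PySem.Str.replace module ".py" "")
    if PySem.Str.isIn "auth" module_name then
      descriptions.insert module "Handles authentication and user session management"
    else if PySem.Str.isIn "user" module_name then
      descriptions.insert module "Manages user profile data and user-related operations"
    else if PySem.Str.isIn "database" module_name || PySem.Str.isIn "db" module_name then
      descriptions.insert module "Provides database connection and query utilities"
    else if PySem.Str.isIn "cache" module_name then
      descriptions.insert module "Implements caching layer for performance optimization"
    else if PySem.Str.isIn "api" module_name || PySem.Str.isIn "server" module_name then
      descriptions.insert module "Handles API endpoints and server request processing"
    else if PySem.Str.isIn "model" module_name then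
      descriptions.insert module "Defines data models and business logic"
    else if PySem.Str.isIn "util" module_name || PySem.Str.isIn "helper" module_name then
      descriptions.insert module "Provides utility functions and helper methods"
    else if PySem.Str.isIn "config" module_name then
      descriptions.insert module "Manages application configuration and settings"
    else if PySem.Str.isIn "logger" module_name || PySem.Str.isIn "log" module_name then
      descriptions.insert module "Handles logging and debugging functionality"
    else
      descriptions.insert module ("Module for " ++ module_name ++ " functionality"))
    = fun (d : PySem.Dict String String) m => d.insert m (pvChain (pvNorm m)) := by
  funext d m
  simp only [pvChain, pvNorm]
  split_ifs <;> rfl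

-- ===== VERDICT (by name: the statement is the Claim_ definition above) =====
theorem generate_module_descriptions_py_spec : Claim_equal_generate_module_descriptions_py := by
  intro modules _
  unfold Spec_generate_module_descriptions_py generate_module_descriptions_py generate_module_descriptions_py_alt
  rw [pv_bodyA]
  set dA := modules.foldl (fun (d : PySem.Dict String String) m => d.insert m (pvChain (pvNorm m))) PySem.Dict.empty with hdA
  set d0 := modules.foldl (fun (d : PySem.Dict String String) m =>
      d.insert m ("Module for " ++ pvNorm m ++ " functionality")) PySem.Dict.empty with hd0
  set dB := pvKeywordDescriptions.reverse.foldl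
      (fun d kd => modules.foldl (fun d m => if PySem.Str.isIn kd.1 (pvNorm m) then d.insert m kd.2 else d) d)
      d0 with hdB
  have hkA : dA.keys = PySem.Set.ofList modules := by
    rw [hdA]
    simpa [PySem.Set.update_nil_left] using
      PySem.Dict.keys_foldl_insert modules (fun _ m => pvChain (pvNorm m)) PySem.Dict.empty
  have hk0 : d0.keys = PySem.Set.ofList modules := by
    rw [hd0]
    simpa [PySem.Set.update_nil_left] using
      PySem.Dict.keys_foldl_insert modules (fun _ m => "Module for " ++ pvNorm m ++ " functionality") PySem.Dict.empty
  have hmem0 : ∀ m ∈ modules, m ∈ d0.keys := by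
    intro m hm; rw [hk0]; exact (PySem.Set.mem_ofList _ _).2 hm
  have hkB : dB.keys = d0.keys := pv_sweep_keys _ _ _ hmem0
  have hndA : dA.keys.Nodup := by rw [hkA]; exact PySem.Set.nodup_ofList modules
  have hndB : dB.keys.Nodup := by rw [hkB, hk0]; exact PySem.Set.nodup_ofList modules
  have hget : ∀ x ∈ modules, dA.get? x = dB.get? x := by
    intro x hx
    rw [hdA, hdB, pv_build_get, pv_sweep_get, if_pos hx, if_pos hx, List.reverse_reverse,
        hd0, pv_build_get, if_pos hx]
    have := pv_table_eq_chain (pvNorm x)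
    rcases hf : pvTableVal pvKeywordDescriptions (pvNorm x) with _ | s <;> rw [hf] at this <;>
      simp only [Option.getD_none, Option.getD_some] at this <;> simp [this]
  show dA.items = dB.items
  rw [PySem.Dict.items_eq_map_keys dA hndA "", PySem.Dict.items_eq_map_keys dB hndB "",
      hkB, hk0, ← hkA]
  refine List.map_congr_left (fun k hk => ?_)
  have hkm : k ∈ modules := by
    rw [hkA] at hk
    exact (PySem.Set.mem_ofList _ _).1 hk
  rw [PySem.Dict.getD_eq_get?_getD, PySem.Dict.getD_eq_get?_getD, hget k hkm]
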